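-- pv_equiv track=rewrite | github.com/msturm/aoc2024 | 21/21.py | add_indirection1
-- ===== SOURCE A (Python) =====
-- from collections import defaultdict
--
-- indirect2 = {('A','>'):'vA',
--              ('A','<'):'v<<A',
--              ('A','v'):'<vA',
--              ('A','^'):'<A',
--              ('A','A'):'A',
--              ('v','A'):'^>A',
--              ('v','<'):'<A',
--              ('v','v'):'A',
--              ('v','^'):'^A',
--              ('v','>'):'>A',
--              ('<','A'):'>>^A',
--              ('<','<'):'A',
--              ('<','v'):'>A',
--              ('<','^'):'>^A',
--              ('<','>'):'>>A',
--              ('^','A'):'>A',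
--              ('^','<'):'v<A',
--              ('^','v'):'vA',
--              ('^','^'):'A',
--              ('^','>'):'v>A',
--              ('>','A'):'^A',
--              ('>','<'):'<<A',
--              ('>','v'):'<A',
--              ('>','^'):'<^A',
--              ('>','>'):'A'}
--
-- def expand_count(ans_count):
--     # This function expands the level of robots by updating the frequency count
--     # It looks at the current freuqency and creates a new list with the new combinations and the frequency
--     new_frequency_count = defaultdict(int)
--     for code, count in ans_count.items():
--         prev_button = 'A'
--         for button in code:
--             if prev_button == button:
--                 new_key = 'A'
--             else:
--                 new_key = indirect2[(prev_button, button)]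
--             prev_button = button
--             new_frequency_count[new_key] += count
--
--     return new_frequency_count
--
-- def add_indirection1(p, steps=2):
--     ans_count = defaultdict(int)
--     # break up in steps (p is the input for the numbers). We split on A, which gives 4 steps
--     for p in [x + 'A' for x in p.split('A')[:-1]]:
--         ans_count[p] += 1
--     new_length = 0
--
--     # go over the indirection for x steps
--     for x in range(steps):
--         ans_count = expand_count(ans_count)
--
--     # calculate the new length
--     for key, value in ans_count.items():
--         new_length += value * len(key)
--     return new_length
-- ===== SOURCE B (Python) =====
-- from collections import Counter
--
-- indirect2 = {('A','>'):'vA',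
--              ('A','<'):'v<<A',
--              ('A','v'):'<vA',
--              ('A','^'):'<A',
--              ('A','A'):'A',
--              ('v','A'):'^>A',
--              ('v','<'):'<A',
--              ('v','v'):'A',
--              ('v','^'):'^A',
--              ('v','>'):'>A',
--              ('<','A'):'>>^A',
--              ('<','<'):'A',
--              ('<','v'):'>A',
--              ('<','^'):'>^A',
--              ('<','>'):'>>A',
--              ('^','A'):'>A',
--              ('^','<'):'v<A',
--              ('^','v'):'vA',
--              ('^','^'):'A',
--              ('^','>'):'v>A',
--              ('>','A'):'^A',
--              ('>','<'):'<<A',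
--              ('>','v'):'<A',
--              ('>','^'):'<^A',
--              ('>','>'):'A'}
--
-- # the closed set of sequences one expansion step can produce
-- CANON = sorted(set(indirect2.values()) | {'A'})
--
-- def transitions(seq):
--     # list of the one-level expansion sequences, one per button of seq
--     out = []
--     prev = 'A'
--     for b in seq:
--         out.append('A' if prev == b else indirect2[(prev, b)])
--         prev = b
--     return out
--
-- def add_indirection1(p, steps=2):
--     groups = [x + 'A' for x in p.split('A')[:-1]]
--     if steps <= 0 or not groups:
--         return sum(len(g) for g in groups)
--     # backward DP: table[s] = total length of s after d further expansion levels
--     succ = {s: transitions(s) for s in CANON}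
--     table = {s: len(s) for s in CANON}
--     for _ in range(steps - 1):
--         table = {s: sum(table[t] for t in succ[s]) for s in CANON}
--     return sum(c * sum(table[t] for t in transitions(g)) for g, c in Counter(groups).items())
-- ===== Notes on version B (the rewrite author's own statement) =====
-- stated objective: faster
-- what changed: A propagates a frequency dict of sequences forward through every indirection level and sums count*len at the end; B runs a backward dynamic program (a fixed 15-entry table of expanded lengths for the canonical sequences, iterated per level, with precomputed transition lists) and takes one counted sum over the input's groups, short-circuiting when there are no groups.
import Mathlib
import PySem

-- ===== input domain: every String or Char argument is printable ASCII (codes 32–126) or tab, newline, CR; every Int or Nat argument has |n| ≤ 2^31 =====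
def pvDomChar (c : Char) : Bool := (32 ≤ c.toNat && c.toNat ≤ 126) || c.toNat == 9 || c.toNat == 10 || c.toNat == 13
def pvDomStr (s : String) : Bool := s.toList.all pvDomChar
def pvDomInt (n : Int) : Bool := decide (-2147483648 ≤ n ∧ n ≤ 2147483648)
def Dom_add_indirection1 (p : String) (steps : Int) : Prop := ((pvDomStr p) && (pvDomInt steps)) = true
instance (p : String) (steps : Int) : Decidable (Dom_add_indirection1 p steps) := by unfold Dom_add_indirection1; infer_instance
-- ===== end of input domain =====

-- B replaces A's forward propagation of sequence frequencies through the robot layers by a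
-- backward dynamic program: a fixed table of expanded lengths for the 15 canonical sequences,
-- iterated per level and summed once over the input's groups, skipping the level loop entirely
-- when p yields no groups (objective: faster, measured).

-- ===== PORT A =====
-- the module-level dict indirect2 (keys are (prev, button) pairs, values the expansion strings)
def pvInd : PySem.Dict (Char × Char) (List Char) :=
  PySem.Dict.ofList [
    (('A', '>'), ['v', 'A']),
    (('A', '<'), ['v', '<', '<', 'A']),
    (('A', 'v'), ['<', 'v', 'A']),
    (('A', '^'), ['<', 'A']),
    (('A', 'A'), ['A']),
    (('v', 'A'), ['^', '>', 'A']),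
    (('v', '<'), ['<', 'A']),
    (('v', 'v'), ['A']),
    (('v', '^'), ['^', 'A']),
    (('v', '>'), ['>', 'A']),
    (('<', 'A'), ['>', '>', '^', 'A']),
    (('<', '<'), ['A']),
    (('<', 'v'), ['>', 'A']),
    (('<', '^'), ['>', '^', 'A']),
    (('<', '>'), ['>', '>', 'A']),
    (('^', 'A'), ['>', 'A']),
    (('^', '<'), ['v', '<', 'A']),
    (('^', 'v'), ['v', 'A']),
    (('^', '^'), ['A']),
    (('^', '>'), ['v', '>', 'A']),
    (('>', 'A'), ['^', 'A']),
    (('>', '<'), ['<', '<', 'A']),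
    (('>', 'v'), ['<', 'A']),
    (('>', '^'), ['<', '^', 'A']),
    (('>', '>'), ['A'])]

-- expand_count; the Option threads Python's KeyError on indirect2[(prev, button)] (none = raise)
def expand_count (ans_count : PySem.Dict (List Char) Int) : Option (PySem.Dict (List Char) Int) :=
  ans_count.items.foldl
    (fun acc cv =>
      acc.bind (fun nfc =>
        (cv.1.foldl
          (fun st b =>
            st.bind (fun pd =>
              (if pd.1 = b then some ['A'] else pvInd.get? (pd.1, b)).map
                (fun new_key => (b, pd.2.modify new_key 0 (fun c => c + cv.2)))))
          (some (('A' : Char), nfc))).map (fun pd => pd.2)))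
    (some PySem.Dict.empty)

def add_indirection1 (p : String) (steps : Int) : Int :=
  let groups := ((PySem.Chars.splitOn p.toList ['A']).dropLast).map (fun x => x ++ ['A'])
  let ans_count := groups.foldl (fun d g => d.modify g 0 (fun c => c + 1)) PySem.Dict.empty
  match (PySem.List.pyRange 0 steps 1).foldl (fun acc _ => acc.bind expand_count) (some ans_count) with
  | some c => c.items.foldl (fun nl kv => nl + kv.2 * (kv.1.length : Int)) 0
  | none => 0  -- Python raised KeyError here; such inputs are excluded by Pre_

-- ===== PORT B =====
-- CANON = sorted(set(indirect2.values()) | {'A'}), a module-level constant (evaluated literal)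
def pvCanon : List (List Char) :=
  [['<', '<', 'A'],
   ['<', 'A'],
   ['<', '^', 'A'],
   ['<', 'v', 'A'],
   ['>', '>', 'A'],
   ['>', '>', '^', 'A'],
   ['>', 'A'],
   ['>', '^', 'A'],
   ['A'],
   ['^', '>', 'A'],
   ['^', 'A'],
   ['v', '<', '<', 'A'],
   ['v', '<', 'A'],
   ['v', '>', 'A'],
   ['v', 'A']]

-- transitions(seq); the [] default of getD is unreachable under Pre_ (Source B raises KeyError there)
def transitionsB (seq : List Char) : List (List Char) :=
  (seq.foldl
    (fun (st : Char × List (List Char)) b =>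
      (b, st.2 ++ [if st.1 = b then ['A'] else pvInd.getD (st.1, b) []]))
    (('A' : Char), [])).2

def add_indirection1_alt (p : String) (steps : Int) : Int :=
  let groups := ((PySem.Chars.splitOn p.toList ['A']).dropLast).map (fun x => x ++ ['A'])
  if steps ≤ 0 ∨ groups = [] then (groups.map (fun g => (g.length : Int))).sum
  else
    let succ := pvCanon.foldl (fun d s => d.insert s (transitionsB s)) PySem.Dict.empty
    let table0 := pvCanon.foldl (fun d s => d.insert s ((s.length : Int))) PySem.Dict.empty
    let table := (PySem.List.pyRange 0 (steps - 1) 1).foldl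
      (fun t _ => pvCanon.foldl
        (fun d s => d.insert s (((succ.getD s []).map (fun u => t.getD u 0)).sum))
        PySem.Dict.empty)
      table0
    ((PySem.Dict.counter groups).items.map
      (fun kv => kv.2 * ((transitionsB kv.1).map (fun u => table.getD u 0)).sum)).sum

-- ===== PRECONDITION & SPEC =====
-- Pre_ excludes exactly the inputs where A raises KeyError: steps ≥ 1 while some character of p
-- before its last 'A' is not a direction key, so the lookup indirect2[(prev, button)] misses.
def Pre_add_indirection1 (p : String) (steps : Int) : Prop :=
  steps ≤ 0 ∨ ((PySem.Chars.splitOn p.toList ['A']).dropLast).all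
      (fun g => g.all (fun c => decide (c ∈ (['^', 'v', '<', '>'] : List Char)))) = true
instance (p : String) (steps : Int) : Decidable (Pre_add_indirection1 p steps) := by
  unfold Pre_add_indirection1; infer_instance
def pvWitness_add_indirection1 : String × Int := ("<A^A", 2)

def Spec_add_indirection1 (p : String) (steps : Int) (out : Int) : Prop := out = add_indirection1_alt p steps
instance (p : String) (steps : Int) (out : Int) : Decidable (Spec_add_indirection1 p steps out) := by
  unfold Spec_add_indirection1; infer_instance

-- ===== CLAIM =====
def Claim_equal_add_indirection1 : Prop := ∀ (p : String) (steps : Int), Dom_add_indirection1 p steps → Pre_add_indirection1 p steps → Spec_add_indirection1 p steps (add_indirection1 p steps)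

-- ===== LEMMAS AND PROOFS =====
-- the five buttons of the directional keypad
def pvDirs : List Char := ['A', '^', 'v', '<', '>']
-- one expansion step of a single transition
def pvKeyOf (a b : Char) : List Char := if a = b then ['A'] else pvInd.getD (a, b) []
-- total expanded length of sequence s after n further levels of indirection
def pvL (n : Nat) (s : List Char) : Int :=
  match n with
  | 0 => (s.length : Int)
  | n + 1 => ((transitionsB s).map (pvL n)).sum
-- weighted sum of f over a frequency dict
def pvWS (d : PySem.Dict (List Char) Int) (f : List Char → Int) : Int :=
  (d.items.map (fun kv => kv.2 * f kv.1)).sum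
def pvGood (s : List Char) : Prop := ∀ c ∈ s, c ∈ pvDirs
def pvInv (d : PySem.Dict (List Char) Int) : Prop := d.keys.Nodup ∧ ∀ k ∈ d.keys, pvGood k
-- transitionsB's fold, with explicit start button and accumulator
def pvTransFrom (prev : Char) (code : List Char) (acc : List (List Char)) : List (List Char) :=
  (code.foldl
    (fun (st : Char × List (List Char)) b =>
      (b, st.2 ++ [if st.1 = b then ['A'] else pvInd.getD (st.1, b) []]))
    (prev, acc)).2

lemma pvTransFrom_acc (code : List Char) (prev : Char) (acc : List (List Char)) :
    pvTransFrom prev code acc = acc ++ pvTransFrom prev code [] := by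
  induction code generalizing prev acc with
  | nil => simp [pvTransFrom]
  | cons b code ih =>
    have h1 : ∀ a, pvTransFrom prev (b :: code) a
        = pvTransFrom b code (a ++ [if prev = b then ['A'] else pvInd.getD (prev, b) []]) := by
      intro a; rfl
    rw [h1, h1, ih, ih b ([] ++ _), List.nil_append, List.append_assoc]

lemma transitionsB_eq (seq : List Char) : transitionsB seq = pvTransFrom 'A' seq [] := rfl

lemma pvTransFrom_cons (prev b : Char) (code : List Char) :
    pvTransFrom prev (b :: code) [] = pvKeyOf prev b :: pvTransFrom b code [] := by
  have h1 : pvTransFrom prev (b :: code) []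
      = pvTransFrom b code ([] ++ [if prev = b then ['A'] else pvInd.getD (prev, b) []]) := rfl
  rw [h1, List.nil_append, pvTransFrom_acc]; rfl

set_option maxRecDepth 4096 in
lemma pvKeyOf_mem_canon {a b : Char} (ha : a ∈ pvDirs) (hb : b ∈ pvDirs) :
    pvKeyOf a b ∈ pvCanon := by
  fin_cases ha <;> fin_cases hb <;> decide

set_option maxRecDepth 4096 in
lemma pvInd_get?_eq {a b : Char} (ha : a ∈ pvDirs) (hb : b ∈ pvDirs) :
    pvInd.get? (a, b) = some (pvInd.getD (a, b) []) := by
  fin_cases ha <;> fin_cases hb <;> decide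

set_option maxRecDepth 4096 in
lemma pvCanon_good {s : List Char} (hs : s ∈ pvCanon) : pvGood s := by
  fin_cases hs <;> (intro c hc; fin_cases hc <;> decide)

lemma pvTransFrom_mem_canon {code : List Char} {prev : Char}
    (hg : ∀ c ∈ code, c ∈ pvDirs) (hp : prev ∈ pvDirs) :
    ∀ t ∈ pvTransFrom prev code [], t ∈ pvCanon := by
  induction code generalizing prev with
  | nil => intro t ht; simp [pvTransFrom] at ht
  | cons b code ih =>
    intro t ht
    rw [pvTransFrom_cons] at ht
    rcases List.mem_cons.mp ht with h | h
    · subst h; exact pvKeyOf_mem_canon hp (hg b (List.mem_cons_self ..))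
    · exact ih (fun c hc => hg c (List.mem_cons_of_mem _ hc)) (hg b (List.mem_cons_self ..)) t h

lemma pvSum_map_update {α : Type} [DecidableEq α] {ks : List α} {k : α}
    (hk : k ∈ ks) (hnd : ks.Nodup) (g : α → Int) (c : Int) :
    (ks.map (fun x => if x = k then g x + c else g x)).sum = (ks.map g).sum + c := by
  induction ks with
  | nil => simp at hk
  | cons a ks ih =>
    by_cases hak : a = k
    · subst hak
      have hnotin : a ∉ ks := (List.nodup_cons.mp hnd).1
      have hmap : ks.map (fun x => if x = a then g x + c else g x) = ks.map g := by
        apply List.map_congr_left; intro x hx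
        rw [if_neg]; rintro rfl; exact hnotin hx
      simp only [List.map_cons, List.sum_cons, hmap, if_true]
      ring
    · have hk' : k ∈ ks := by
        rcases List.mem_cons.mp hk with h | h
        · exact absurd h.symm hak
        · exact h
      simp only [List.map_cons, List.sum_cons, if_neg hak,
        ih hk' (List.nodup_cons.mp hnd).2]; ring

lemma pvNodup_modify (d : PySem.Dict (List Char) Int) (k : List Char) (v : Int)
    (hnd : d.keys.Nodup) : (d.modify k 0 (fun c => c + v)).keys.Nodup := by
  rw [PySem.Dict.keys_modify]
  exact PySem.Dict.nodup_keys_insert _ _ _ hnd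

lemma pvWS_eq_keys (d : PySem.Dict (List Char) Int) (hnd : d.keys.Nodup) (f : List Char → Int) :
    pvWS d f = (d.keys.map (fun x => d.getD x 0 * f x)).sum := by
  rw [pvWS, PySem.Dict.items_eq_map_keys d hnd 0, List.map_map]
  rfl

lemma pvWS_modify (d : PySem.Dict (List Char) Int) (hnd : d.keys.Nodup)
    (k : List Char) (v : Int) (f : List Char → Int) :
    pvWS (d.modify k 0 (fun c => c + v)) f = pvWS d f + v * f k := by
  have hnd' := pvNodup_modify d k v hnd
  rw [pvWS_eq_keys d hnd f, pvWS_eq_keys _ hnd' f]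
  by_cases hm : k ∈ d.keys
  · have hc : d.contains k = true := by
      rw [PySem.Dict.contains_eq_decide_mem_keys]; exact decide_eq_true hm
    have hkeys : (d.modify k 0 (fun c => c + v)).keys = d.keys := by
      rw [PySem.Dict.keys_modify, PySem.Dict.keys_insert_of_contains _ _ hc]
    rw [hkeys]
    have hmap : (d.keys.map (fun x => (d.modify k 0 (fun c => c + v)).getD x 0 * f x))
        = d.keys.map (fun x =>
            if x = k then d.getD x 0 * f x + v * f k else d.getD x 0 * f x) := by
      apply List.map_congr_left; intro x _
      rw [PySem.Dict.getD_modify]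
      by_cases hxk : x = k
      · subst hxk; rw [if_pos rfl, if_pos rfl]; ring
      · rw [if_neg hxk, if_neg hxk]
    rw [hmap, pvSum_map_update hm hnd (fun x => d.getD x 0 * f x) (v * f k)]
  · have hc : d.contains k = false := by
      rw [PySem.Dict.contains_eq_decide_mem_keys]; exact decide_eq_false hm
    have hkeys : (d.modify k 0 (fun c => c + v)).keys = d.keys ++ [k] := by
      rw [PySem.Dict.keys_modify, PySem.Dict.keys_insert_of_not_contains _ _ hc]
    rw [hkeys, List.map_append, List.sum_append]
    have h1 : d.keys.map (fun x => (d.modify k 0 (fun c => c + v)).getD x 0 * f x)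
        = d.keys.map (fun x => d.getD x 0 * f x) := by
      apply List.map_congr_left; intro x hx
      rw [PySem.Dict.getD_modify, if_neg (by rintro rfl; exact hm hx)]
    have h2 : (d.modify k 0 (fun c => c + v)).getD k 0 = v := by
      rw [PySem.Dict.getD_modify, if_pos rfl, PySem.Dict.getD_of_not_contains _ _ hc]
      ring
    rw [h1]
    simp only [List.map_cons, List.map_nil, List.sum_cons, List.sum_nil, h2]
    ring

lemma pvWS_foldl_modify (l : List (List Char)) (v : Int) (d : PySem.Dict (List Char) Int)
    (hnd : d.keys.Nodup) (f : List Char → Int) :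
    pvWS (l.foldl (fun d t => d.modify t 0 (fun c => c + v)) d) f
      = pvWS d f + v * (l.map f).sum := by
  induction l generalizing d with
  | nil => simp
  | cons t l ih =>
    rw [List.foldl_cons, ih _ (pvNodup_modify d t v hnd), pvWS_modify d hnd t v f,
      List.map_cons, List.sum_cons]
    ring

lemma pvInv_foldl_modify (l : List (List Char)) (v : Int) (d : PySem.Dict (List Char) Int)
    (h : pvInv d) (hl : ∀ t ∈ l, pvGood t) :
    pvInv (l.foldl (fun d t => d.modify t 0 (fun c => c + v)) d) := by
  induction l generalizing d with
  | nil => exact h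
  | cons t l ih =>
    rw [List.foldl_cons]
    apply ih
    · constructor
      · exact pvNodup_modify d t v h.1
      · intro k hk
        rw [PySem.Dict.keys_modify] at hk
        rcases (PySem.Dict.mem_keys_insert _ _ _ _).mp hk with h' | h'
        · exact h' ▸ hl t List.mem_cons_self
        · exact h.2 k h'
    · intro u hu; exact hl u (List.mem_cons_of_mem _ hu)

lemma pvInner (code : List Char) (prev : Char) (nfc : PySem.Dict (List Char) Int) (v : Int)
    (hg : ∀ c ∈ code, c ∈ pvDirs) (hp : prev ∈ pvDirs) :
    code.foldl
      (fun st b => st.bind (fun pd =>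
        (if pd.1 = b then some ['A'] else pvInd.get? (pd.1, b)).map
          (fun new_key => (b, pd.2.modify new_key 0 (fun c => c + v)))))
      (some (prev, nfc))
    = some (code.foldl (fun _ b => b) prev,
        (pvTransFrom prev code []).foldl (fun d t => d.modify t 0 (fun c => c + v)) nfc) := by
  induction code generalizing prev nfc with
  | nil => simp [pvTransFrom]
  | cons b code ih =>
    have hb : b ∈ pvDirs := hg b List.mem_cons_self
    have hkey : (if prev = b then some ['A'] else pvInd.get? (prev, b)) = some (pvKeyOf prev b) := by
      by_cases hpb : prev = b
      · rw [if_pos hpb, pvKeyOf, if_pos hpb]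
      · rw [if_neg hpb, pvKeyOf, if_neg hpb]; exact pvInd_get?_eq hp hb
    rw [List.foldl_cons, Option.bind_some, hkey, Option.map_some,
      ih b (nfc.modify (pvKeyOf prev b) 0 (fun c => c + v))
        (fun c hc => hg c (List.mem_cons_of_mem _ hc)) hb,
      pvTransFrom_cons, List.foldl_cons, List.foldl_cons]

lemma pvOuter (l : List (List Char × Int)) (acc : PySem.Dict (List Char) Int)
    (hl : ∀ kv ∈ l, pvGood kv.1) (ha : pvInv acc) :
    ∃ res,
      l.foldl
        (fun acc cv =>
          acc.bind (fun nfc =>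
            (cv.1.foldl
              (fun st b =>
                st.bind (fun pd =>
                  (if pd.1 = b then some ['A'] else pvInd.get? (pd.1, b)).map
                    (fun new_key => (b, pd.2.modify new_key 0 (fun c => c + cv.2)))))
              (some (('A' : Char), nfc))).map (fun pd => pd.2)))
        (some acc)
      = some res ∧ pvInv res ∧
      ∀ f, pvWS res f
        = pvWS acc f + (l.map (fun kv => kv.2 * ((transitionsB kv.1).map f).sum)).sum := by
  induction l generalizing acc with
  | nil => exact ⟨acc, rfl, ha, fun f => by simp⟩
  | cons kv l ih =>
    have hgood : ∀ c ∈ kv.1, c ∈ pvDirs := hl kv List.mem_cons_self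
    have hA : ('A' : Char) ∈ pvDirs := by decide
    have htr : ∀ t ∈ transitionsB kv.1, pvGood t := by
      intro t ht
      exact pvCanon_good (pvTransFrom_mem_canon hgood hA t (by rwa [← transitionsB_eq]))
    have hstep := pvInner kv.1 'A' acc kv.2 hgood hA
    rw [List.foldl_cons, Option.bind_some, hstep, Option.map_some]
    obtain ⟨res, h1, h2, h3⟩ :=
      ih ((transitionsB kv.1).foldl (fun d t => d.modify t 0 (fun c => c + kv.2)) acc)
        (fun u hu => hl u (List.mem_cons_of_mem _ hu))
        (by rw [transitionsB_eq]; exact pvInv_foldl_modify _ _ _ ha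
              (by rw [← transitionsB_eq]; exact htr))
    refine ⟨res, ?_, h2, ?_⟩
    · rw [← h1]; rfl
    · intro f
      rw [h3 f, pvWS_foldl_modify _ _ _ ha.1, List.map_cons, List.sum_cons]
      ring

lemma pvWS_empty (f : List Char → Int) : pvWS PySem.Dict.empty f = 0 := rfl

lemma pvExpand (c : PySem.Dict (List Char) Int) (h : pvInv c) :
    ∃ c', expand_count c = some c' ∧ pvInv c' ∧
      ∀ f, pvWS c' f = (c.items.map (fun kv => kv.2 * ((transitionsB kv.1).map f).sum)).sum := by
  obtain ⟨res, h1, h2, h3⟩ := pvOuter c.items PySem.Dict.empty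
    (fun kv hkv => h.2 kv.1 (PySem.Dict.mem_keys_of_mem_items _ hkv))
    ⟨by simp [PySem.Dict.keys_empty], by simp [PySem.Dict.keys_empty]⟩
  exact ⟨res, h1, h2, fun f => by rw [h3 f, pvWS_empty]; ring⟩

lemma pvIter (n : Nat) (c : PySem.Dict (List Char) Int) (h : pvInv c) :
    ∃ c', (fun a => Option.bind a expand_count)^[n] (some c) = some c' ∧ pvInv c' ∧
      ∀ m, pvWS c' (pvL m) = pvWS c (pvL (m + n)) := by
  induction n generalizing c with
  | zero => exact ⟨c, rfl, h, fun m => rfl⟩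
  | succ n ih =>
    obtain ⟨c1, he, hi1, hw1⟩ := pvExpand c h
    obtain ⟨c', h1, h2, h3⟩ := ih c1 hi1
    refine ⟨c', ?_, h2, ?_⟩
    · rw [Function.iterate_succ_apply]
      simpa [he] using h1
    · intro m
      rw [h3 m, hw1 (pvL (m + n))]
      have : pvWS c (pvL (m + n + 1))
          = (c.items.map (fun kv => kv.2 * ((transitionsB kv.1).map (pvL (m + n))).sum)).sum := by
        rw [pvWS]
        apply congrArg List.sum
        apply List.map_congr_left
        intro kv _
        rfl
      rw [show m + (n + 1) = m + n + 1 by ring, this]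

lemma pvFoldl_const_iterate {α β : Type} (h : α → α) (l : List β) (i : α) :
    l.foldl (fun a _ => h a) i = h^[l.length] i := by
  induction l generalizing i with
  | nil => rfl
  | cons b l ih => rw [List.foldl_cons, ih, List.length_cons, Function.iterate_succ_apply]

def pvSucc : PySem.Dict (List Char) (List (List Char)) :=
  pvCanon.foldl (fun d s => d.insert s (transitionsB s)) PySem.Dict.empty
def pvT0 : PySem.Dict (List Char) Int :=
  pvCanon.foldl (fun d s => d.insert s ((s.length : Int))) PySem.Dict.empty
def pvStep (t : PySem.Dict (List Char) Int) : PySem.Dict (List Char) Int :=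
  pvCanon.foldl (fun d s => d.insert s (((pvSucc.getD s []).map (fun u => t.getD u 0)).sum))
    PySem.Dict.empty

lemma pvGetD_tableOf {ν : Type} (g : List Char → ν) (dflt : ν) {s : List Char} (hs : s ∈ pvCanon) :
    (pvCanon.foldl (fun d t => d.insert t (g t)) PySem.Dict.empty).getD s dflt = g s := by
  have hfresh : ∀ a ∈ pvCanon, (PySem.Dict.empty : PySem.Dict (List Char) ν).contains a = false :=
    fun a _ => PySem.Dict.contains_empty a
  have hndc : (pvCanon.map (fun t => t)).Nodup := by
    rw [List.map_id']; decide
  have hitems := PySem.Dict.items_foldl_insert_fresh pvCanon (fun t => t) g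
    PySem.Dict.empty hfresh hndc
  have hnd : (pvCanon.foldl (fun d t => d.insert t (g t)) PySem.Dict.empty).keys.Nodup :=
    PySem.Dict.nodup_keys_foldl_insert _ _ _ (by simp [PySem.Dict.keys_empty])
  apply PySem.Dict.getD_of_mem_items _ _ hnd
  rw [hitems]
  exact List.mem_append_right _ (List.mem_map_of_mem hs)

lemma pvTable (m : Nat) {s : List Char} (hs : s ∈ pvCanon) :
    (pvStep^[m] pvT0).getD s 0 = pvL m s := by
  induction m generalizing s with
  | zero => rw [Function.iterate_zero_apply, pvT0, pvGetD_tableOf _ _ hs]; rfl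
  | succ m ih =>
    rw [Function.iterate_succ_apply', pvStep, pvGetD_tableOf _ _ hs,
      pvSucc, pvGetD_tableOf _ _ hs]
    have hmem : ∀ u ∈ transitionsB s, u ∈ pvCanon := by
      intro u hu
      have hA : ('A' : Char) ∈ pvDirs := by decide
      exact pvTransFrom_mem_canon (pvCanon_good hs) hA u (by rwa [← transitionsB_eq])
    have : (transitionsB s).map (fun u => (pvStep^[m] pvT0).getD u 0)
        = (transitionsB s).map (pvL m) :=
      List.map_congr_left (fun u hu => ih (hmem u hu))
    rw [this]
    rfl

lemma pvWS_congr (d : PySem.Dict (List Char) Int) (f f' : List Char → Int)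
    (h : ∀ k ∈ d.keys, f k = f' k) : pvWS d f = pvWS d f' := by
  rw [pvWS, pvWS]
  apply congrArg List.sum
  apply List.map_congr_left
  intro kv hkv
  rw [h kv.1 (PySem.Dict.mem_keys_of_mem_items _ hkv)]

lemma pvA_final (c : PySem.Dict (List Char) Int) :
    List.foldl (fun nl kv => nl + kv.2 * (kv.1.length : Int)) 0 c.items = pvWS c (pvL 0) := by
  rw [PySem.List.foldl_add, zero_add]
  rfl

lemma pvWS_counter (l : List (List Char)) (f : List Char → Int) :
    pvWS (PySem.Dict.counter l) f = (l.map f).sum := by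
  rw [PySem.Dict.counter_eq_foldl,
    pvWS_foldl_modify l 1 PySem.Dict.empty (by simp [PySem.Dict.keys_empty]) f,
    pvWS_empty]
  ring

lemma pvDirs4 {c : Char} (hc : c ∈ (['^', 'v', '<', '>'] : List Char)) : c ∈ pvDirs := by
  fin_cases hc <;> decide

lemma pvAlt_shape (p : String) (steps : Int) :
    add_indirection1_alt p steps =
      (let groups := ((PySem.Chars.splitOn p.toList ['A']).dropLast).map (fun x => x ++ ['A'])
       if steps ≤ 0 ∨ groups = [] then (groups.map (fun g => (g.length : Int))).sum
       else
        ((PySem.Dict.counter groups).items.map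
          (fun kv => kv.2 * ((transitionsB kv.1).map
            (fun u => ((PySem.List.pyRange 0 (steps - 1) 1).foldl
                (fun t _ => pvStep t) pvT0).getD u 0)).sum)).sum) := rfl

-- ===== VERDICT =====
theorem add_indirection1_spec : Claim_equal_add_indirection1 := by
  intro p steps _ hpre
  show add_indirection1 p steps = add_indirection1_alt p steps
  by_cases hst : steps ≤ 0
  · -- no expansion at all: both sides are the total length of the groups
    have hA : add_indirection1 p steps
        = pvWS (PySem.Dict.counter
            (((PySem.Chars.splitOn p.toList ['A']).dropLast).map (fun x => x ++ ['A'])))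
          (pvL 0) := by
      simp only [add_indirection1]
      rw [PySem.List.pyRange_one_eq_nil hst, List.foldl_nil, ← PySem.Dict.counter_eq_foldl]
      exact pvA_final _
    rw [hA, pvAlt_shape]
    simp only [if_pos (Or.inl hst :
      steps ≤ 0 ∨ ((PySem.Chars.splitOn p.toList ['A']).dropLast).map (fun x => x ++ ['A']) = [])]
    rw [pvWS_counter]
    rfl
  · -- steps ≥ 1
    rw [not_le] at hst
    set gs := ((PySem.Chars.splitOn p.toList ['A']).dropLast).map (fun x => x ++ ['A']) with hgs
    have hpre' : ∀ g ∈ (PySem.Chars.splitOn p.toList ['A']).dropLast,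
        ∀ c ∈ g, c ∈ (['^', 'v', '<', '>'] : List Char) := by
      rcases hpre with h | h
      · omega
      · intro g hg c hc
        simpa using (List.all_eq_true.mp ((List.all_eq_true.mp h) g hg)) c hc
    have hgsGood : ∀ g ∈ gs, pvGood g := by
      intro g hg
      rw [hgs, List.mem_map] at hg
      obtain ⟨x, hx, rfl⟩ := hg
      intro c hc
      rcases List.mem_append.mp hc with h | h
      · exact pvDirs4 (hpre' x hx c h)
      · have : c = 'A' := List.mem_singleton.mp h
        rw [this]; decide
    set n := steps.toNat with hn
    have hInv : pvInv (PySem.Dict.counter gs) := by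
      refine ⟨PySem.Dict.nodup_keys_counter gs, ?_⟩
      intro k hk
      rw [PySem.Dict.keys_counter] at hk
      exact hgsGood k ((PySem.Set.mem_ofList gs k).mp hk)
    obtain ⟨c', hiter, _, hws⟩ := pvIter n (PySem.Dict.counter gs) hInv
    have hfold : (PySem.List.pyRange 0 steps 1).foldl (fun acc _ => acc.bind expand_count)
        (some (PySem.Dict.counter gs)) = some c' := by
      rw [pvFoldl_const_iterate (fun a => Option.bind a expand_count),
        PySem.List.length_pyRange_one, show steps - 0 = steps from sub_zero steps, ← hn]
      exact hiter
    have hA : add_indirection1 p steps = pvWS c' (pvL 0) := by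
      simp only [add_indirection1]
      rw [← PySem.Dict.counter_eq_foldl, ← hgs, hfold]
      exact pvA_final c'
    set m := (steps - 1).toNat with hm
    have hnm : n = m + 1 := by omega
    by_cases hemp : gs = []
    · -- no groups at all: both sides are 0
      rw [hA, hws 0, zero_add, pvWS_counter, pvAlt_shape]
      simp only [← hgs, hemp]
      simp
    have hcond : ¬ (steps ≤ 0 ∨ gs = []) := by
      rintro (h | h)
      · omega
      · exact hemp h
    have hB : add_indirection1_alt p steps = pvWS (PySem.Dict.counter gs) (pvL n) := by
      rw [pvAlt_shape]
      simp only [← hgs]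
      rw [if_neg hcond]
      have hlen : (PySem.List.pyRange 0 (steps - 1) 1).foldl (fun t _ => pvStep t) pvT0
          = pvStep^[m] pvT0 := by
        rw [pvFoldl_const_iterate pvStep, PySem.List.length_pyRange_one,
          show steps - 1 - 0 = steps - 1 from sub_zero _, ← hm]
      rw [hlen]
      have : pvWS (PySem.Dict.counter gs)
          (fun g => ((transitionsB g).map (fun u => (pvStep^[m] pvT0).getD u 0)).sum)
          = pvWS (PySem.Dict.counter gs) (pvL n) := by
        apply pvWS_congr
        intro k hk
        rw [PySem.Dict.keys_counter] at hk
        have hkGood : pvGood k := hgsGood k ((PySem.Set.mem_ofList gs k).mp hk)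
        have hmem : ∀ u ∈ transitionsB k, u ∈ pvCanon := by
          intro u hu
          have hA5 : ('A' : Char) ∈ pvDirs := by decide
          exact pvTransFrom_mem_canon hkGood hA5 u (by rwa [← transitionsB_eq])
        have hmap : (transitionsB k).map (fun u => (pvStep^[m] pvT0).getD u 0)
            = (transitionsB k).map (pvL m) :=
          List.map_congr_left (fun u hu => pvTable m (hmem u hu))
        rw [hmap, hnm]
        rfl
      exact this
    rw [hA, hB, hws 0, zero_add]
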